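-- pv_equiv track=rewrite | github.com/Leticia2512/Proyecto-Final-Bootcamp-KeepCoding | RAG/transform.py | join_paragraph_lines
-- ===== SOURCE A (Python) =====
-- from typing import Any, List
--
-- def join_paragraph_lines(lines: List[str]) -> List[str]:
--     """Une líneas consecutivas no vacías en párrafos; deja doble salto entre párrafos."""
--     out: List[str] = []
--     buffer: List[str] = []
--
--     def flush():
--         if buffer:
--             out.append(" ".join(buffer))
--             buffer.clear()
--
--     for ln in lines:
--         if ln:
--             buffer.append(ln)
--         else:
--             flush()
--     flush()
--     return out
-- ===== SOURCE B (Python) =====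
-- from typing import List
--
-- def join_paragraph_lines(lines: List[str]) -> List[str]:
--     """Une líneas consecutivas no vacías en párrafos; deja doble salto entre párrafos."""
--     try:
--         i = lines.index("")
--     except ValueError:
--         return [" ".join(lines)] if lines else []
--     head = lines[:i]
--     rest = join_paragraph_lines(lines[i + 1:])
--     return ([" ".join(head)] if head else []) + rest
-- ===== Notes on version B (the rewrite author's own statement) =====
-- stated objective: alternative
-- what changed: Replaces A's single-pass loop with an out/buffer accumulator and nested flush() closure by a divide-and-conquer recursion: locate the first empty line with list.index, join the prefix, and recurse on the suffix.
import Mathlib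
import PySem

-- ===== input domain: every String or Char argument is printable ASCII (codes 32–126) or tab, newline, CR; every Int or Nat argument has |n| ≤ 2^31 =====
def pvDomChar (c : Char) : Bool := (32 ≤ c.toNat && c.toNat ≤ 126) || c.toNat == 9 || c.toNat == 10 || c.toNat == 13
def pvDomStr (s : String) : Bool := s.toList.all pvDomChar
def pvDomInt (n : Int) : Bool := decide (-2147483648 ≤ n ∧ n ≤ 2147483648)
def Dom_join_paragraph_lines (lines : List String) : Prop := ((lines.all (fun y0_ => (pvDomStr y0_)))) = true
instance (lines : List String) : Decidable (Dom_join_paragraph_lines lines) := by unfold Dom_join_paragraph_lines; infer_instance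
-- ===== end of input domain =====

-- B replaces A's one-pass out/buffer accumulator (with nested flush() closure) by a
-- divide-and-conquer recursion that splits at the first empty line — objective: alternative.

-- ===== PORT A =====
-- A's loop threads (out, buffer); `flush` appends " ".join(buffer) to out when buffer ≠ [].
def pvFlushA (s : List String × List String) : List String × List String :=
  if s.2 ≠ [] then (s.1 ++ [PySem.Str.join " " s.2], []) else s

def pvStepA (s : List String × List String) (ln : String) : List String × List String :=
  if ln ≠ "" then (s.1, s.2 ++ [ln]) else pvFlushA s

def join_paragraph_lines (lines : List String) : List String :=
  let r := lines.foldl pvStepA ([], [])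
  (pvFlushA r).1

-- ===== PORT B =====
-- lines.index("") → PySem.List.index?; slices lines[:i], lines[i+1:] → PySem.List.slice;
-- recursion terminates because the suffix lines[i+1:] is strictly shorter.
def join_paragraph_lines_alt (lines : List String) : List String :=
  match h : PySem.List.index? lines "" with
  | none => if lines ≠ [] then [PySem.Str.join " " lines] else []
  | some i =>
    let head := PySem.List.slice lines none (some (i : Int))
    let rest := join_paragraph_lines_alt (PySem.List.slice lines (some ((i : Int) + 1)) none)
    (if head ≠ [] then [PySem.Str.join " " head] else []) ++ rest
termination_by lines.length
decreasing_by
  obtain ⟨hk, -, -⟩ := PySem.List.getElem_of_index?_eq_some h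
  have : ((i : Int) + 1) = ((i + 1 : Nat) : Int) := by push_cast; ring
  rw [this, PySem.List.slice_from_natCast, List.length_drop]
  omega

-- ===== PRECONDITION & SPEC =====
def Spec_join_paragraph_lines (lines : List String) (out : List String) : Prop := out = join_paragraph_lines_alt lines
instance (lines : List String) (out : List String) : Decidable (Spec_join_paragraph_lines lines out) := by unfold Spec_join_paragraph_lines; infer_instance

-- ===== CLAIM (what is proved, stated in full; the proofs are below) =====
def Claim_equal_join_paragraph_lines : Prop := ∀ (lines : List String), Dom_join_paragraph_lines lines → Spec_join_paragraph_lines lines (join_paragraph_lines lines)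

-- ===== LEMMAS AND PROOFS =====

-- reference recursion: A's remaining computation given current buffer
def pvParas (buf : List String) : List String → List String
  | [] => if buf = [] then [] else [PySem.Str.join " " buf]
  | x :: xs =>
    if x ≠ "" then pvParas (buf ++ [x]) xs
    else if buf = [] then pvParas [] xs
    else PySem.Str.join " " buf :: pvParas [] xs

lemma pvA_loop (lines : List String) : ∀ (out buf : List String),
    (pvFlushA (lines.foldl pvStepA (out, buf))).1 = out ++ pvParas buf lines := by
  induction lines with
  | nil =>
    intro out buf
    by_cases h : buf = [] <;> simp [pvFlushA, pvParas, h]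
  | cons x xs ih =>
    intro out buf
    rw [List.foldl_cons]
    by_cases hx : x = ""
    · by_cases hb : buf = []
      · have hs : pvStepA (out, buf) x = (out, []) := by
          simp [pvStepA, pvFlushA, hx, hb]
        rw [hs, ih, pvParas]; simp [hx, hb]
      · have hs : pvStepA (out, buf) x = (out ++ [PySem.Str.join " " buf], []) := by
          simp [pvStepA, pvFlushA, hx, hb]
        rw [hs, ih, pvParas]; simp [hx, hb]
    · have hs : pvStepA (out, buf) x = (out, buf ++ [x]) := by
        simp [pvStepA, hx]
      rw [hs, ih, pvParas]; simp [hx]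

lemma pvParas_no_empty (rest : List String) : ∀ (buf : List String), "" ∉ rest →
    pvParas buf rest = if buf ++ rest = [] then [] else [PySem.Str.join " " (buf ++ rest)] := by
  induction rest with
  | nil => intro buf _; simp [pvParas]
  | cons x xs ih =>
    intro buf hmem
    have hx : x ≠ "" := fun h => hmem (by simp [h])
    have hxs : "" ∉ xs := fun h => hmem (by simp [h])
    rw [pvParas]
    simp only [hx, if_pos, ne_eq, not_false_eq_true]
    rw [ih _ hxs]
    have hne' : buf ++ x :: xs ≠ [] := by simp
    simp [hne', List.append_assoc]

lemma pvParas_split (pre : List String) : ∀ (buf suf : List String), "" ∉ pre →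
    pvParas buf (pre ++ "" :: suf)
      = (if buf ++ pre = [] then [] else [PySem.Str.join " " (buf ++ pre)]) ++ pvParas [] suf := by
  induction pre with
  | nil =>
    intro buf suf _
    rw [List.nil_append, pvParas]
    by_cases hb : buf = [] <;> simp [hb]
  | cons x pre' ih =>
    intro buf suf hmem
    have hx : x ≠ "" := fun h => hmem (by simp [h])
    have hpre : "" ∉ pre' := fun h => hmem (by simp [h])
    rw [List.cons_append, pvParas]
    simp only [hx, ne_eq, not_false_eq_true]
    rw [ih _ _ hpre]
    have hne' : buf ++ x :: pre' ≠ [] := by simp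
    simp [hne', List.append_assoc]

lemma pvAlt_eq_pvParas (lines : List String) :
    join_paragraph_lines_alt lines = pvParas [] lines := by
  rw [join_paragraph_lines_alt]
  rcases h : PySem.List.index? lines "" with _ | i
  · have hmem : "" ∉ lines := (PySem.List.index?_eq_none_iff lines "").mp h
    rw [pvParas_no_empty lines [] hmem]
    by_cases hl : lines = [] <;> simp [hl]
  · obtain ⟨pre, suf, hsplit, hlen, hpre⟩ := (PySem.List.index?_eq_some_iff lines "" i).mp h
    subst hlen
    have hhead : PySem.List.slice lines none (some ((pre.length : Nat) : Int)) = pre := by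
      rw [PySem.List.slice_to_natCast, hsplit, List.take_left]
    have hrest : PySem.List.slice lines (some (((pre.length : Nat) : Int) + 1)) none = suf := by
      have hc : ((pre.length : Int) + 1) = ((pre.length + 1 : Nat) : Int) := by push_cast; ring
      rw [hc, PySem.List.slice_from_natCast, hsplit]
      simp
    have ihs : join_paragraph_lines_alt suf = pvParas [] suf := pvAlt_eq_pvParas suf
    simp only [hhead, hrest, ihs]
    rw [hsplit, pvParas_split pre [] suf hpre]
    simp only [List.nil_append]
    by_cases hp : pre = [] <;> simp [hp]
termination_by lines.length
decreasing_by
  rw [hsplit]; simp; omega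

-- ===== VERDICT (by name: the statement is the Claim_ definition above) =====
theorem join_paragraph_lines_spec : Claim_equal_join_paragraph_lines := by
  intro lines _
  show join_paragraph_lines lines = join_paragraph_lines_alt lines
  rw [pvAlt_eq_pvParas]
  have := pvA_loop lines [] []
  simpa [join_paragraph_lines] using this
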